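-- pv_equiv track=rewrite | github.com/gidabrams23/COT_Freight_Optimization_Tool | services/optimization_engine.py | check_stacking_compatibility
-- ===== SOURCE A (Python) =====
-- def check_stacking_compatibility(order_lines):
--     categories = {
--         (line.get("trailer_category") or "STANDARD").upper() for line in order_lines
--     }
--     if "WIDE" in categories and len(categories) > 1:
--         return False
--     if "MIXED" in categories and "WIDE" in categories:
--         return False
--     return True
-- ===== SOURCE B (Python) =====
-- def check_stacking_compatibility(order_lines):
--     has_wide = False
--     has_non_wide = False
--     for line in order_lines:
--         cat = (line.get("trailer_category") or "STANDARD").upper()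
--         if cat == "WIDE":
--             has_wide = True
--         else:
--             has_non_wide = True
--     return not (has_wide and has_non_wide)
-- ===== Notes on version B (the rewrite author's own statement) =====
-- stated objective: simpler
-- what changed: Replaces the set comprehension plus two membership/size branches (the MIXED branch being redundant) with a single pass keeping two boolean flags: WIDE seen and a non-WIDE category seen; returns not (both).
import Mathlib
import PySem

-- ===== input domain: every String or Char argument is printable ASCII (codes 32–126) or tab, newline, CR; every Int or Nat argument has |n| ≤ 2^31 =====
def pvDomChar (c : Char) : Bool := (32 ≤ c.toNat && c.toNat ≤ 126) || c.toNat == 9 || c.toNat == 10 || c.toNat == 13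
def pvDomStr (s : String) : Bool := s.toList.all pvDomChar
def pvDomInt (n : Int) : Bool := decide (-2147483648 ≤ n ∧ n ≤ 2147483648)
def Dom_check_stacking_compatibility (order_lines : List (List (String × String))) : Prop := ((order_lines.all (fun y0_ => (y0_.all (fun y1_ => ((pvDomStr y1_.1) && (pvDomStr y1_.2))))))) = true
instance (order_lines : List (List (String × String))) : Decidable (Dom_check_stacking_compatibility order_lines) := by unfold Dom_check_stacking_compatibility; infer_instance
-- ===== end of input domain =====

-- B replaces the set comprehension and its two membership/size branches (the MIXED one
-- being redundant) with a single pass keeping two boolean flags.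

-- shared per-line normalization: (line.get("trailer_category") or "STANDARD").upper()
def pvCategory (line : List (String × String)) : String :=
  PySem.Str.upper
    (match line.find? (fun kv => kv.1 == "trailer_category") with
     | some kv => if kv.2 = "" then "STANDARD" else kv.2
     | none => "STANDARD")

-- ===== PORT A =====
def check_stacking_compatibility (order_lines : List (List (String × String))) : Bool :=
  let categories : PySem.Set String := PySem.Set.ofList (order_lines.map pvCategory)
  if PySem.Set.contains categories "WIDE" && categories.length > 1 then false
  else if PySem.Set.contains categories "MIXED" && PySem.Set.contains categories "WIDE" then false
  else true

-- ===== PORT B =====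
def check_stacking_compatibility_alt (order_lines : List (List (String × String))) : Bool :=
  let flags := order_lines.foldl
    (fun (p : Bool × Bool) line =>
      let cat := pvCategory line
      if cat = "WIDE" then (true, p.2) else (p.1, true))
    (false, false)
  !(flags.1 && flags.2)

-- ===== PRECONDITION & SPEC =====
def Spec_check_stacking_compatibility (order_lines : List (List (String × String))) (out : Bool) : Prop := out = check_stacking_compatibility_alt order_lines
instance (order_lines : List (List (String × String))) (out : Bool) : Decidable (Spec_check_stacking_compatibility order_lines out) := by unfold Spec_check_stacking_compatibility; infer_instance

-- ===== CLAIM (what is proved, stated in full; the proofs are below) =====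
def Claim_equal_check_stacking_compatibility : Prop := ∀ (order_lines : List (List (String × String))), Dom_check_stacking_compatibility order_lines → Spec_check_stacking_compatibility order_lines (check_stacking_compatibility order_lines)

-- ===== LEMMAS AND PROOFS =====

-- B's fold computes the two 'any' flags over the normalized categories
theorem foldl_flags (l : List (List (String × String))) (hw hnw : Bool) :
    l.foldl (fun (p : Bool × Bool) line =>
        let cat := pvCategory line
        if cat = "WIDE" then (true, p.2) else (p.1, true)) (hw, hnw)
      = (hw || (l.map pvCategory).any (fun c => c = "WIDE"),
         hnw || (l.map pvCategory).any (fun c => c ≠ "WIDE")) := by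
  induction l generalizing hw hnw with
  | nil => simp
  | cons x t ih =>
    simp only [List.foldl_cons, List.map_cons, List.any_cons]
    by_cases h : pvCategory x = "WIDE" <;>
      simp [h, ih]

theorem two_distinct_length {α : Type} (s : List α) (a b : α)
    (ha : a ∈ s) (hb : b ∈ s) (hab : a ≠ b) : 1 < s.length := by
  match s with
  | [] => simp at ha
  | [x] =>
    simp at ha hb; exact absurd (ha.trans hb.symm) hab
  | x :: y :: t => simp

theorem nodup_all_eq_length {α : Type} (s : List α) (a : α)
    (hn : s.Nodup) (h : ∀ x ∈ s, x = a) : s.length ≤ 1 := by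
  match s with
  | [] => simp
  | [x] => simp
  | x :: y :: t =>
    have hx := h x (by simp)
    have hy := h y (by simp)
    simp [List.nodup_cons] at hn
    exact absurd (hx.trans hy.symm) (by tauto)

-- A's first condition, characterized over the list of categories
theorem wide_and_big_iff (l : List String) :
    ("WIDE" ∈ PySem.Set.ofList l ∧ 1 < (PySem.Set.ofList l).length)
      ↔ ("WIDE" ∈ l ∧ ∃ x ∈ l, x ≠ "WIDE") := by
  constructor
  · rintro ⟨hw, hlen⟩
    refine ⟨(PySem.Set.mem_ofList l "WIDE").1 hw, ?_⟩
    by_contra hno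
    rw [not_exists] at hno
    simp only [not_and, not_not] at hno
    have hall : ∀ x ∈ PySem.Set.ofList l, x = "WIDE" := by
      intro x hx; exact hno x ((PySem.Set.mem_ofList l x).1 hx)
    have := nodup_all_eq_length _ "WIDE" (PySem.Set.nodup_ofList l) hall
    omega
  · rintro ⟨hw, x, hx, hxw⟩
    refine ⟨(PySem.Set.mem_ofList l "WIDE").2 hw, ?_⟩
    exact two_distinct_length _ "WIDE" x ((PySem.Set.mem_ofList l "WIDE").2 hw)
      ((PySem.Set.mem_ofList l x).2 hx) (Ne.symm hxw)

-- ===== VERDICT (by name: the statement is the Claim_ definition above) =====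
theorem check_stacking_compatibility_spec : Claim_equal_check_stacking_compatibility := by
  intro ol _
  unfold Spec_check_stacking_compatibility
  unfold check_stacking_compatibility check_stacking_compatibility_alt
  rw [foldl_flags]
  set l := ol.map pvCategory with hl
  by_cases h1 : ("WIDE" ∈ PySem.Set.ofList l ∧ 1 < (PySem.Set.ofList l).length)
  · -- A's first branch fires; B has both flags true
    obtain ⟨hw, x, hx, hxw⟩ := (wide_and_big_iff l).1 h1
    have hany2 : (l.any fun c => decide (c ≠ "WIDE")) = true := by
      simp only [List.any_eq_true]; exact ⟨x, hx, by simpa using hxw⟩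
    simp only [List.any_eq_true] at hany2
    simp [hw, h1.2]
    exact ⟨x, hx, hxw⟩
  · -- neither of A's branches fires, and B's flags are not both true
    by_cases hw : "WIDE" ∈ l
    · have hall : ∀ x ∈ l, x = "WIDE" := by
        intro x hx
        by_contra hxw
        exact h1 ((wide_and_big_iff l).2 ⟨hw, x, hx, hxw⟩)
      have hQ : ¬ 1 < (PySem.Set.ofList l).length := fun hq =>
        h1 ⟨(PySem.Set.mem_ofList l "WIDE").2 hw, hq⟩
      have hmx : "MIXED" ∉ l := fun hm => by
        have := hall "MIXED" hm; simp at this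
      have hany2 : (l.any fun c => decide (c ≠ "WIDE")) = false := by
        simp only [List.any_eq_false]
        intro x hx; simpa using hall x hx
      simp [hw, hQ, hmx]
      exact Or.inr hall
    · have hany1 : (l.any fun c => decide (c = "WIDE")) = false := by
        simp only [List.any_eq_false]
        intro x hx
        by_contra hc
        rw [decide_eq_true_iff] at hc
        exact hw (hc ▸ hx)
      simp [hw, hany1]
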